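-- pv_equiv track=rewrite | github.com/file-not-found/crackstuff | mask_eval.py | calc
-- ===== SOURCE A (Python) =====
-- def calc(mask):
--     i=1
--     for c in mask[1::2]:
--         if c not in 'ludhHsab':
--             return 0
--         if c =='l':
--             i=i*26
--         elif c =='u':
--             i=i*26
--         elif c =='d':
--             i=i*10
--         elif c =='h':
--             i=i*16
--         elif c =='H':
--             i=i*16
--         elif c =='s':
--             i=i*33
--         elif c =='a':
--             i=i*95
--         elif c =='b':
--             i=i*256
--         else:
--             return 0
--     return i
-- ===== SOURCE B (Python) =====
-- FACTOR = {'l': 26, 'u': 26, 'd': 10, 'h': 16, 'H': 16, 's': 33, 'a': 95, 'b': 256}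
--
-- def calc(mask):
--     counts = {}
--     for c in mask[1::2]:
--         counts[c] = counts.get(c, 0) + 1
--     prod = 1
--     for c, n in counts.items():
--         if c not in FACTOR:
--             return 0
--         prod *= FACTOR[c] ** n
--     return prod
-- ===== Notes on version B (the rewrite author's own statement) =====
-- stated objective: faster
-- what changed: Instead of A's per-occurrence multiply-with-early-return over mask[1::2], B builds a frequency dict of mask[1::2] once and then multiplies factor[c]**count per distinct character (returning 0 if any distinct character is outside the factor table), replacing n big-int multiplications by at most 8 fast exponentiations.
import Mathlib
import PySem

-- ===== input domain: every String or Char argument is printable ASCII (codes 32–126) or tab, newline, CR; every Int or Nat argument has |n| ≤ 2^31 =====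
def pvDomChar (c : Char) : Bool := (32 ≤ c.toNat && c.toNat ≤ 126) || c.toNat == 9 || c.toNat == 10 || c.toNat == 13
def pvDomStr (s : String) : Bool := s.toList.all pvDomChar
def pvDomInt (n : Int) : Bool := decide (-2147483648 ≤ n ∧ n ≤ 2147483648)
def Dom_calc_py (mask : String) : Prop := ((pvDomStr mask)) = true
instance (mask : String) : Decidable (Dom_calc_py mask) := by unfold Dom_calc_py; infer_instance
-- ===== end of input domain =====

-- B replaces A's per-occurrence multiply-with-early-return loop by a frequency dict over
-- mask[1::2] plus one exponentiation per distinct char (objective: alternative decomposition).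

-- ===== PORT A =====
-- A's loop over mask[1::2]: early return 0 on an invalid char, else multiply in branch order.
def calcLoopA : List Char → Int → Int
  | [], i => i
  | c :: cs, i =>
    if ("ludhHsab".toList.contains c) = false then 0
    else if c == 'l' then calcLoopA cs (i * 26)
    else if c == 'u' then calcLoopA cs (i * 26)
    else if c == 'd' then calcLoopA cs (i * 10)
    else if c == 'h' then calcLoopA cs (i * 16)
    else if c == 'H' then calcLoopA cs (i * 16)
    else if c == 's' then calcLoopA cs (i * 33)
    else if c == 'a' then calcLoopA cs (i * 95)
    else if c == 'b' then calcLoopA cs (i * 256)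
    else 0

def calc_py (mask : String) : Int :=
  match PySem.Str.slice? mask (some 1) none 2 with
  | some sub => calcLoopA sub.toList 1
  | none => 0   -- unreachable: step 2 ≠ 0

-- ===== PORT B =====
def calcFactor : PySem.Dict Char Int :=
  PySem.Dict.ofList [('l', 26), ('u', 26), ('d', 10), ('h', 16), ('H', 16), ('s', 33), ('a', 95), ('b', 256)]

-- B's loop over the (char, count) items: return 0 on a key absent from FACTOR, else multiply FACTOR[c]**n.
def calcLoopB : List (Char × Int) → Int → Int
  | [], p => p
  | (c, n) :: rest, p =>
    match calcFactor.get? c with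
    | none => 0
    | some f => calcLoopB rest (p * f ^ n.toNat)

def calc_py_alt (mask : String) : Int :=
  match PySem.Str.slice? mask (some 1) none 2 with
  | some sub => calcLoopB (PySem.Dict.counter sub.toList).items 1
  | none => 0   -- unreachable: step 2 ≠ 0

-- ===== PRECONDITION & SPEC =====
def Spec_calc_py (mask : String) (out : Int) : Prop := out = calc_py_alt mask
instance (mask : String) (out : Int) : Decidable (Spec_calc_py mask out) := by unfold Spec_calc_py; infer_instance

-- ===== CLAIM (what is proved, stated in full; the proofs are below) =====
def Claim_equal_calc_py : Prop := ∀ (mask : String), Dom_calc_py mask → Spec_calc_py mask (calc_py mask)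

-- ===== LEMMAS AND PROOFS =====
def calcV : List Char := ['l', 'u', 'd', 'h', 'H', 's', 'a', 'b']

def calcFval : Char → Int := fun c =>
  if c = 'l' ∨ c = 'u' then 26
  else if c = 'd' then 10
  else if c = 'h' ∨ c = 'H' then 16
  else if c = 's' then 33
  else if c = 'a' then 95
  else 256

lemma calcFactor_get? (c : Char) :
    calcFactor.get? c = if c ∈ calcV then some (calcFval c) else none := by
  by_cases h : c ∈ calcV
  · rw [if_pos h]
    simp only [calcV, List.mem_cons, List.not_mem_nil, or_false] at h
    rcases h with rfl | rfl | rfl | rfl | rfl | rfl | rfl | rfl <;> decide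
  · rw [if_neg h]
    simp only [calcV, List.mem_cons, List.not_mem_nil, or_false, not_or] at h
    obtain ⟨h1, h2, h3, h4, h5, h6, h7, h8⟩ := h
    have hmk : calcFactor = PySem.Dict.mk
        [('l', 26), ('u', 26), ('d', 10), ('h', 16), ('H', 16), ('s', 33), ('a', 95), ('b', 256)] := by
      decide
    rw [hmk]
    simp only [PySem.Dict.get?_mk_cons, beq_iff_eq,
      if_neg (Ne.symm h1), if_neg (Ne.symm h2), if_neg (Ne.symm h3), if_neg (Ne.symm h4),
      if_neg (Ne.symm h5), if_neg (Ne.symm h6), if_neg (Ne.symm h7), if_neg (Ne.symm h8)]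
    rfl

lemma calcLoopA_bad : ∀ (xs : List Char) (i : Int), (∃ c ∈ xs, c ∉ calcV) → calcLoopA xs i = 0 := by
  intro xs
  induction xs with
  | nil => rintro i ⟨c, hc, _⟩; exact absurd hc (List.not_mem_nil)
  | cons c cs ih =>
    rintro i ⟨x, hx, hxv⟩
    rcases List.mem_cons.mp hx with rfl | hx'
    · have : ("ludhHsab".toList.contains x) = false := by
        simp only [List.contains_eq_mem, decide_eq_false_iff_not]
        simpa [calcV] using hxv
      simp only [calcLoopA, this]
      simp
    · by_cases hc : ("ludhHsab".toList.contains c) = false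
      · simp only [calcLoopA, hc]
        simp
      · have hcv : c ∈ calcV := by
          simp only [List.contains_eq_mem, decide_eq_false_iff_not, not_not] at hc
          simpa [calcV] using hc
        have hrec : ∀ j : Int, calcLoopA cs j = 0 := fun j => ih j ⟨x, hx', hxv⟩
        simp only [calcV, List.mem_cons, List.not_mem_nil, or_false] at hcv
        rcases hcv with rfl | rfl | rfl | rfl | rfl | rfl | rfl | rfl <;>
          · simp only [calcLoopA]
            rw [if_neg (by decide)]
            simp [hrec]

lemma calcLoopA_good : ∀ (xs : List Char) (i : Int), (∀ c ∈ xs, c ∈ calcV) →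
    calcLoopA xs i = i * (xs.map calcFval).prod := by
  intro xs
  induction xs with
  | nil => intro i _; simp [calcLoopA]
  | cons c cs ih =>
    intro i h
    have hc : c ∈ calcV := h c List.mem_cons_self
    have hcs : ∀ x ∈ cs, x ∈ calcV := fun x hx => h x (List.mem_cons_of_mem _ hx)
    simp only [calcV, List.mem_cons, List.not_mem_nil, or_false] at hc
    rcases hc with rfl | rfl | rfl | rfl | rfl | rfl | rfl | rfl <;>
      · simp only [calcLoopA]
        rw [if_neg (by decide)]
        simp [ih _ hcs, calcFval]
        ring

lemma calcLoopB_bad : ∀ (l : List (Char × Int)) (p : Int),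
    (∃ cn ∈ l, calcFactor.get? cn.1 = none) → calcLoopB l p = 0 := by
  intro l
  induction l with
  | nil => rintro p ⟨cn, hcn, _⟩; exact absurd hcn (List.not_mem_nil)
  | cons cn rest ih =>
    rintro p ⟨x, hx, hxn⟩
    obtain ⟨c, n⟩ := cn
    rcases List.mem_cons.mp hx with rfl | hx'
    · simp only [calcLoopB, hxn]
    · cases hg : calcFactor.get? c with
      | none => simp [calcLoopB, hg]
      | some f => simp only [calcLoopB, hg]; exact ih _ ⟨x, hx', hxn⟩

lemma calcLoopB_good : ∀ (l : List (Char × Int)) (p : Int),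
    (∀ cn ∈ l, (calcFactor.get? cn.1).isSome) →
    calcLoopB l p = p * (l.map (fun cn => (calcFactor.get? cn.1).getD 0 ^ cn.2.toNat)).prod := by
  intro l
  induction l with
  | nil => intro p _; simp [calcLoopB]
  | cons cn rest ih =>
    intro p h
    obtain ⟨c, n⟩ := cn
    have hc := h (c, n) List.mem_cons_self
    cases hg : calcFactor.get? c with
    | none => rw [hg] at hc; simp at hc
    | some f =>
      have hrest : ∀ x ∈ rest, (calcFactor.get? x.1).isSome :=
        fun x hx => h x (List.mem_cons_of_mem _ hx)
      simp only [calcLoopB, hg, ih _ hrest, List.map_cons, List.prod_cons, Option.getD_some]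
      ring

lemma calc_prod_counts (xs : List Char) :
    ((PySem.Set.ofList xs).map (fun k => calcFval k ^ xs.count k)).prod
      = (xs.map calcFval).prod := by
  have hfin : (PySem.Set.ofList xs : List Char).toFinset = xs.toFinset :=
    Finset.ext fun a => by simp [List.mem_toFinset, PySem.Set.mem_ofList]
  rw [Finset.prod_list_map_count xs calcFval, ← hfin,
    List.prod_toFinset _ (PySem.Set.nodup_ofList xs)]

-- ===== VERDICT (by name: the statement is the Claim_ definition above) =====
theorem calc_py_spec : Claim_equal_calc_py := by
  intro mask _
  unfold Spec_calc_py calc_py calc_py_alt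
  cases hs : PySem.Str.slice? mask (some 1) none 2 with
  | none => rfl
  | some sub =>
    show calcLoopA sub.toList 1 = calcLoopB (PySem.Dict.counter sub.toList).items 1
    set xs := sub.toList with hxs
    by_cases hall : ∀ c ∈ xs, c ∈ calcV
    · rw [calcLoopA_good xs 1 hall, PySem.Dict.items_counter,
        calcLoopB_good _ 1 (by
          rintro ⟨c, n⟩ hmem
          obtain ⟨k, hk, heq⟩ := List.mem_map.mp hmem
          have hkv : k ∈ calcV := hall k ((PySem.Set.mem_ofList _ _).mp hk)
          cases heq
          simp [calcFactor_get?, hkv])]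
      have : ((PySem.Set.ofList xs).map
          (fun k => (k, (xs.count k : Int)))).map
            (fun cn => (calcFactor.get? cn.1).getD 0 ^ cn.2.toNat)
          = (PySem.Set.ofList xs).map (fun k => calcFval k ^ xs.count k) := by
        rw [List.map_map]
        refine List.map_congr_left (fun k hk => ?_)
        have hkv : k ∈ calcV := hall k ((PySem.Set.mem_ofList _ _).mp hk)
        simp [calcFactor_get?, hkv]
      rw [this, calc_prod_counts]
    · simp only [not_forall] at hall
      obtain ⟨c, hc, hcv⟩ := hall
      rw [calcLoopA_bad xs 1 ⟨c, hc, hcv⟩, PySem.Dict.items_counter,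
        calcLoopB_bad _ 1 ⟨(c, (xs.count c : Int)),
          List.mem_map.mpr ⟨c, (PySem.Set.mem_ofList _ _).mpr hc, rfl⟩, by
            simp [calcFactor_get?, hcv]⟩]
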